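-- pv_equiv track=rewrite | github.com/trangyp/AMOS-Code | amos_self_evolution_test_suite.py | _extract_fingerprint
-- ===== SOURCE A (Python) =====
-- def _extract_fingerprint(code: str) -> dict[str, str]:
--     """Extract function signatures from code."""
--     fingerprint = {}
--     for line in code.split("\n"):
--         if line.strip().startswith("def "):
--             # Extract def line
--             sig = line.strip()
--             func_name = sig[4:].split("(")[0].strip()
--             fingerprint[func_name] = sig
--     return fingerprint
-- ===== SOURCE B (Python) =====
-- def _extract_fingerprint(code: str) -> dict[str, str]:
--     """Extract function signatures from code, in one character-level pass."""
--     fingerprint = {}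
--     buf = []
--     for ch in code + "\n":
--         if ch == "\n":
--             sig = "".join(buf).strip()
--             if sig[:4] == "def ":
--                 fingerprint[sig[4:].split("(")[0].strip()] = sig
--             buf = []
--         else:
--             buf.append(ch)
--     return fingerprint
-- ===== Notes on version B (the rewrite author's own statement) =====
-- stated objective: alternative
-- what changed: Replaces split('\n')-then-loop by a single character-level streaming pass that buffers the current line and flushes it at each newline, extracting the signature at flush time.
import Mathlib
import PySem

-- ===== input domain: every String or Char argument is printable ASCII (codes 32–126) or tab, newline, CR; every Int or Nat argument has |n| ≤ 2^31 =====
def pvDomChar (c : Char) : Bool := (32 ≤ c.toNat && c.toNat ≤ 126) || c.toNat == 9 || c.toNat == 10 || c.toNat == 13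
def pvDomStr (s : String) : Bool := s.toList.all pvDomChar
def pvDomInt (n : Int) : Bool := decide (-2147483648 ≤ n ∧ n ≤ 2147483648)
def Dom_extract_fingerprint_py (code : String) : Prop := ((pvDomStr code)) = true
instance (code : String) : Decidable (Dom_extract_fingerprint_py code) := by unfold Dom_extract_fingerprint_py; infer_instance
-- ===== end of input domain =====

-- B replaces split("\n")+loop by a single character-level streaming pass with an explicit
-- line buffer (same per-line extraction); objective: alternative traversal, same cost.

-- ===== PORT A =====
-- literal port of A: split on "\n", loop with strip/startswith guard, dict insert.
def extract_fingerprint_py (code : String) : List (String × String) :=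
  -- split? returns some because the separator "\n" is nonempty; .getD [] discharges the Option
  (((PySem.Str.split? code "\n").getD []).foldl
    (fun (fp : PySem.Dict String String) line =>
      let sig := PySem.Str.strip line
      if PySem.Str.startswith sig "def " then
        let func_name :=
          PySem.Str.strip
            ((((PySem.Str.split? (PySem.Str.slice sig (some 4) none) "(").getD [])).headD "")
        fp.insert func_name sig
      else fp)
    PySem.Dict.empty).items

-- ===== PORT B =====
-- literal port of B: fold over the characters of code + "\n", buffering the current line,
-- flushing the buffer at each newline ("".join of one-char strings is the buffered char list).
def extract_fingerprint_py_alt (code : String) : List (String × String) :=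
  (((code.toList ++ ['\n']).foldl
    (fun (st : PySem.Dict String String × List Char) ch =>
      if ch = '\n' then
        let sig := PySem.Chars.strip st.2
        if PySem.Chars.slice sig none (some 4) = "def ".toList then
          (st.1.insert
            (String.ofList (PySem.Chars.strip
              ((PySem.Chars.splitOn (PySem.Chars.slice sig (some 4) none) "(".toList).headD [])))
            (String.ofList sig), ([] : List Char))
        else (st.1, ([] : List Char))
      else (st.1, st.2 ++ [ch]))
    (PySem.Dict.empty, [])).1).items

-- ===== PRECONDITION & SPEC =====
def Spec_extract_fingerprint_py (code : String) (out : List (String × String)) : Prop := out = extract_fingerprint_py_alt code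
instance (code : String) (out : List (String × String)) : Decidable (Spec_extract_fingerprint_py code out) := by unfold Spec_extract_fingerprint_py; infer_instance

-- ===== CLAIM (what is proved, stated in full; the proofs are below) =====
def Claim_equal_extract_fingerprint_py : Prop := ∀ (code : String), Dom_extract_fingerprint_py code → Spec_extract_fingerprint_py code (extract_fingerprint_py code)

-- ===== LEMMAS AND PROOFS =====

-- proof-side line splitter: (head, tail) of the "\n"-split of a char list
def pvSplitNl : List Char → List Char × List (List Char)
  | [] => ([], [])
  | c :: cs =>
    let p := pvSplitNl cs
    if c = '\n' then ([], p.1 :: p.2) else (c :: p.1, p.2)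

-- the shared per-line handler, on char lists
def pvHandle (fp : PySem.Dict String String) (l : List Char) : PySem.Dict String String :=
  let sig := PySem.Chars.strip l
  if PySem.Chars.slice sig none (some 4) = "def ".toList then
    fp.insert
      (String.ofList (PySem.Chars.strip
        ((PySem.Chars.splitOn (PySem.Chars.slice sig (some 4) none) "(".toList).headD [])))
      (String.ofList sig)
  else fp

-- the guard "stripped line begins with 'def '" stated two ways: startswith vs slice[:4] equality
theorem pv_cond (s : List Char) :
    PySem.Chars.startswith s "def ".toList = decide (PySem.Chars.slice s none (some 4) = "def ".toList) := by
  have h4 : ((4 : Int)) = ((4 : Nat) : Int) := by norm_num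
  have hsl : PySem.Chars.slice s none (some 4) = s.take 4 := by
    rw [PySem.Chars.slice_eq_listSlice, h4, PySem.List.slice_to]
    all_goals simp
  rw [hsl]
  by_cases h : "def ".toList <+: s
  · have := (PySem.Chars.startswith_iff s "def ".toList).mpr h
    rw [this]
    have : s.take 4 = "def ".toList := by
      have := List.prefix_iff_eq_take.mp h
      simpa using this.symm
    simp [this]
  · have hb : PySem.Chars.startswith s "def ".toList = false := by
      cases hsw : PySem.Chars.startswith s "def ".toList
      · rfl
      · exact absurd ((PySem.Chars.startswith_iff s "def ".toList).mp hsw) h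
    rw [hb]
    have h' : ¬ s.take 4 = ['d', 'e', 'f', ' '] := by
      intro he
      exact h (List.prefix_iff_eq_take.mpr (by simpa using he.symm))
    simp [h']

theorem pv_go_spec : ∀ (l : List Char) (fuel : Nat) (cur : List Char) (acc : List (List Char)),
    l.length ≤ fuel →
    PySem.Chars.splitOn.go ['\n'] (fuel + 1) l cur acc
      = acc.reverse ++ (cur.reverse ++ (pvSplitNl l).1) :: (pvSplitNl l).2 := by
  intro l
  induction l with
  | nil =>
    intro fuel cur acc _
    simp [PySem.Chars.splitOn.go, pvSplitNl]
  | cons c rest ih =>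
    intro fuel cur acc hle
    cases fuel with
    | zero => simp at hle
    | succ g =>
      have hrest : rest.length ≤ g := by simpa using hle
      by_cases hc : c = '\n'
      · subst hc
        rw [show PySem.Chars.splitOn.go ['\n'] (g + 1 + 1) ('\n' :: rest) cur acc
              = PySem.Chars.splitOn.go ['\n'] (g + 1) rest [] (cur.reverse :: acc) by
            simp [PySem.Chars.splitOn.go, List.isPrefixOf]]
        rw [ih g [] (cur.reverse :: acc) hrest]
        simp [pvSplitNl]
      · rw [show PySem.Chars.splitOn.go ['\n'] (g + 1 + 1) (c :: rest) cur acc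
              = PySem.Chars.splitOn.go ['\n'] (g + 1) rest (c :: cur) acc by
            simp [PySem.Chars.splitOn.go, List.isPrefixOf, Ne.symm hc]]
        rw [ih g (c :: cur) acc hrest]
        simp [pvSplitNl, hc]

theorem pv_splitOn_nl (l : List Char) :
    PySem.Chars.splitOn l ['\n'] = (pvSplitNl l).1 :: (pvSplitNl l).2 := by
  have := pv_go_spec l l.length [] [] (le_refl _)
  simpa [PySem.Chars.splitOn] using this

def pvStep (st : PySem.Dict String String × List Char) (ch : Char) :
    PySem.Dict String String × List Char :=
  if ch = '\n' then
    let sig := PySem.Chars.strip st.2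
    if PySem.Chars.slice sig none (some 4) = "def ".toList then
      (st.1.insert
        (String.ofList (PySem.Chars.strip
          ((PySem.Chars.splitOn (PySem.Chars.slice sig (some 4) none) "(".toList).headD [])))
        (String.ofList sig), ([] : List Char))
    else (st.1, ([] : List Char))
  else (st.1, st.2 ++ [ch])

theorem pv_step_newline (d : PySem.Dict String String) (buf : List Char) :
    pvStep (d, buf) '\n' = (pvHandle d buf, []) := by
  simp [pvStep, pvHandle]
  split_ifs <;> rfl

theorem pv_step_other (d : PySem.Dict String String) (buf : List Char) (c : Char)
    (hc : ¬ c = '\n') : pvStep (d, buf) c = (d, buf ++ [c]) := by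
  unfold pvStep
  rw [if_neg hc]

theorem pv_fold_B : ∀ (cs : List Char) (d : PySem.Dict String String) (buf : List Char),
    (cs ++ ['\n']).foldl pvStep (d, buf)
      = (((buf ++ (pvSplitNl cs).1) :: (pvSplitNl cs).2).foldl pvHandle d, []) := by
  intro cs
  induction cs with
  | nil =>
    intro d buf
    simp [pv_step_newline, pvSplitNl]
  | cons c cs' ih =>
    intro d buf
    by_cases hc : c = '\n'
    · subst hc
      rw [List.cons_append, List.foldl_cons, pv_step_newline, ih]
      simp [pvSplitNl]
    · rw [List.cons_append, List.foldl_cons, pv_step_other d buf c hc, ih]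
      simp [pvSplitNl, hc]

theorem pv_handler_A (d : PySem.Dict String String) (l : List Char) :
    (let sig := PySem.Str.strip (String.ofList l)
     if PySem.Str.startswith sig "def " then
       d.insert
         (PySem.Str.strip
           ((((PySem.Str.split? (PySem.Str.slice sig (some 4) none) "(").getD [])).headD ""))
         sig
     else d)
      = pvHandle d l := by
  simp only [PySem.Str.strip, PySem.Str.startswith, PySem.Str.slice, PySem.Str.split?,
    PySem.Chars.split?, String.toList_ofList, pvHandle, pv_cond]
  by_cases hcond : PySem.Chars.slice (PySem.Chars.strip l) none (some 4) = "def ".toList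
  · simp only [hcond, decide_true, if_pos trivial]
    cases hsp : PySem.Chars.splitOn
        (PySem.Chars.slice (PySem.Chars.strip l) (some 4) none) "(".toList with
    | nil => simp
    | cons x xs => simp
  · simp

-- ===== VERDICT (by name: the statement is the Claim_ definition above) =====
set_option maxHeartbeats 1000000 in
theorem extract_fingerprint_py_spec : Claim_equal_extract_fingerprint_py := by
  intro code _
  unfold Spec_extract_fingerprint_py
  have hsplit : PySem.Str.split? code "\n"
      = some ((PySem.Chars.splitOn code.toList ['\n']).map String.ofList) := by
    simp [PySem.Str.split?, PySem.Chars.split?]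
  have hfun : (fun (fp : PySem.Dict String String) l =>
      let sig := PySem.Str.strip (String.ofList l)
      if PySem.Str.startswith sig "def " then
        fp.insert
          (PySem.Str.strip
            ((((PySem.Str.split? (PySem.Str.slice sig (some 4) none) "(").getD [])).headD ""))
          sig
      else fp) = pvHandle := by
    funext d l
    exact pv_handler_A d l
  have hA : extract_fingerprint_py code
      = (((pvSplitNl code.toList).1 :: (pvSplitNl code.toList).2).foldl pvHandle
          PySem.Dict.empty).items := by
    unfold extract_fingerprint_py
    rw [hsplit, Option.getD_some]
    simp only [List.foldl_map]
    rw [hfun, pv_splitOn_nl]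
  have hB : extract_fingerprint_py_alt code
      = (((pvSplitNl code.toList).1 :: (pvSplitNl code.toList).2).foldl pvHandle
          PySem.Dict.empty).items := by
    show (((code.toList ++ ['\n']).foldl pvStep (PySem.Dict.empty, [])).1).items = _
    rw [pv_fold_B]
    simp
  rw [hA, hB]
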